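-- pv_equiv track=rewrite | github.com/tiphainehenry/masterPlatform | client/api/src/utils/graphDataTranslator.py | extractRoleChunks
-- ===== SOURCE A (Python) =====
-- def extractRoleChunks(data):
--     """
--     decomposes dcr textual description into choreography, local events, and relations.
--
--     :param data: dcr description
--     :returns: dictionary of the dcr description with keys {events (ie choreographies), internalEvents (ie local events), linkages (ie relations)}, and list of roles
--     """
--
--     events, internalEvents = [], []
--     groupings, linkages = [], []
--     roles = []
--     #misc = []
--
--     for line in data:
--
--         if ((line[0] != '#') & (line[0:8] != 'pk[role=')):
--
--             if 'role' in line: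
--                 internalEvents.append(line)
--             elif ('src=' in line) or ('?' in line) or ('!' in line):
--                 events.append(line)
--             elif ('-' in line) and ('>' in line):
--                 linkages.append(line)
--
--         for i in range(0, len(linkages)):
--             if (linkages[i][0] == '#'):
--                 linkages.remove(linkages[i])
--
--     chunks = {
--         'events': events,
--         'internalEvents': internalEvents,
--         'linkages': linkages,
--     }
--
--     return chunks
-- ===== SOURCE B (Python) =====
-- def extractRoleChunks(data):
--     """Three independent single-purpose scans replace the elif cascade; the dead
--     linkage-removal loop (its elements never start with '#') is omitted."""
--     def kept(line):
--         return line[:1] != '#' and line[0:8] != 'pk[role='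
--
--     internalEvents = [l for l in data if kept(l) and 'role' in l]
--     events = [l for l in data
--               if kept(l) and 'role' not in l
--               and ('src=' in l or '?' in l or '!' in l)]
--     linkages = [l for l in data
--                 if kept(l) and 'role' not in l
--                 and not ('src=' in l or '?' in l or '!' in l)
--                 and '-' in l and '>' in l]
--     return {'events': events, 'internalEvents': internalEvents, 'linkages': linkages}
-- ===== Notes on version B (the rewrite author's own statement) =====
-- stated objective: simpler
-- what changed: Replaces A's single fold with an elif cascade over three accumulators (plus a dead inner loop that rescans linkages each line and never removes anything) by three independent single-purpose filters over the input, one per output category; the dead loop is omitted and proved removable.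
import Mathlib
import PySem

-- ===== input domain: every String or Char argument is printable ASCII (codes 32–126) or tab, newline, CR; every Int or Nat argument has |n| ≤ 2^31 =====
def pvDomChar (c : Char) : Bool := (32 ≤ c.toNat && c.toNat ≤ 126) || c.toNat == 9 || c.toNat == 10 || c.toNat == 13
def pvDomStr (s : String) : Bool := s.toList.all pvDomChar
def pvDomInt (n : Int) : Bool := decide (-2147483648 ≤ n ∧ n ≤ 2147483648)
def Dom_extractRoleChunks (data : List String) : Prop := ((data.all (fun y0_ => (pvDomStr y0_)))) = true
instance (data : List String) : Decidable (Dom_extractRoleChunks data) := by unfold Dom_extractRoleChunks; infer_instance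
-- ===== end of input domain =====

-- B replaces A's single elif-cascade loop (plus a dead inner removal loop) by three
-- independent single-purpose filters over the input; the dead loop is omitted (objective: simpler).

-- ===== PORT A =====
-- the inner 'for i in range(0, len(linkages)): if linkages[i][0] == '#': linkages.remove(...)'
def pvInnerA (lk : List String) : List String :=
  (PySem.List.pyRange 0 lk.length 1).foldl (fun acc i =>
    match PySem.List.pyGet? acc i with
    | none => acc                                -- Python would raise IndexError here
    | some s =>
      if PySem.Str.pyGet? s 0 = some '#' then
        match PySem.List.remove? acc s with
        | none => acc                            -- Python would raise ValueError here
        | some acc' => acc'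
      else acc) lk

def pvStepA (st : List String × List String × List String) (line : String) :
    List String × List String × List String :=
  let (events, internalEvents, linkages) := st
  let st' :=
    match PySem.Str.pyGet? line 0 with
    | none => (events, internalEvents, linkages)   -- Python raises IndexError on line[0]
    | some c =>
      if c ≠ '#' ∧ PySem.Str.slice line (some 0) (some 8) ≠ "pk[role=" then
        if PySem.Str.isIn "role" line then
          (events, internalEvents ++ [line], linkages)
        else if PySem.Str.isIn "src=" line || PySem.Str.isIn "?" line || PySem.Str.isIn "!" line then
          (events ++ [line], internalEvents, linkages)
        else if PySem.Str.isIn "-" line && PySem.Str.isIn ">" line then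
          (events, internalEvents, linkages ++ [line])
        else (events, internalEvents, linkages)
      else (events, internalEvents, linkages)
  (st'.1, st'.2.1, pvInnerA st'.2.2)

def extractRoleChunks (data : List String) : List (String × List String) :=
  let st := data.foldl pvStepA ([], [], [])
  [("events", st.1), ("internalEvents", st.2.1), ("linkages", st.2.2)]

-- ===== PORT B =====
def pvKeptB (l : String) : Bool :=
  decide (PySem.Str.slice l (some 0) (some 1) ≠ "#") &&
  decide (PySem.Str.slice l (some 0) (some 8) ≠ "pk[role=")

def pvIsEventB (l : String) : Bool :=
  PySem.Str.isIn "src=" l || PySem.Str.isIn "?" l || PySem.Str.isIn "!" l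

def extractRoleChunks_alt (data : List String) : List (String × List String) :=
  let internalEvents := data.filter (fun l => pvKeptB l && PySem.Str.isIn "role" l)
  let events := data.filter (fun l =>
    pvKeptB l && !PySem.Str.isIn "role" l && pvIsEventB l)
  let linkages := data.filter (fun l =>
    pvKeptB l && !PySem.Str.isIn "role" l && !pvIsEventB l &&
    (PySem.Str.isIn "-" l && PySem.Str.isIn ">" l))
  [("events", events), ("internalEvents", internalEvents), ("linkages", linkages)]

-- ===== PRECONDITION & SPEC =====
-- Pre_ excludes inputs containing an empty line, on which A raises IndexError at line[0].
def Pre_extractRoleChunks (data : List String) : Prop := "" ∉ data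
instance (data : List String) : Decidable (Pre_extractRoleChunks data) := by
  unfold Pre_extractRoleChunks; infer_instance

def pvWitness_extractRoleChunks : List String :=
  ["#comment", "pk[role=a]", "role a", "e1 src= b", "x?y", "a->b", "plain"]

def Spec_extractRoleChunks (data : List String) (out : List (String × List String)) : Prop :=
  out = extractRoleChunks_alt data
instance (data : List String) (out : List (String × List String)) :
    Decidable (Spec_extractRoleChunks data out) := by unfold Spec_extractRoleChunks; infer_instance

-- ===== CLAIM (what is proved, stated in full; the proofs are below) =====
def Claim_equal_extractRoleChunks : Prop := ∀ (data : List String),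
  Dom_extractRoleChunks data → Pre_extractRoleChunks data →
  Spec_extractRoleChunks data (extractRoleChunks data)

-- ===== LEMMAS AND PROOFS =====

-- the inner removal loop is the identity when no linkage starts with '#'
theorem pvInnerA_id (lk : List String)
    (h : ∀ s ∈ lk, PySem.Str.pyGet? s 0 ≠ some '#') : pvInnerA lk = lk := by
  unfold pvInnerA
  generalize PySem.List.pyRange 0 (↑lk.length) 1 = L
  induction L with
  | nil => rfl
  | cons i L ih =>
    have hstep : (match PySem.List.pyGet? lk i with
        | none => lk
        | some s =>
          if PySem.Str.pyGet? s 0 = some '#' then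
            match PySem.List.remove? lk s with
            | none => lk
            | some acc' => acc'
          else lk) = lk := by
      cases hg : PySem.List.pyGet? lk i with
      | none => rfl
      | some s =>
        have hs := PySem.List.mem_of_pyGet?_eq_some (xs := lk) (i := i) hg
        have h' := h s hs
        simp at h' ⊢
        simp [h']
    rw [List.foldl_cons]
    show List.foldl _ (match PySem.List.pyGet? lk i with
        | none => lk
        | some s =>
          if PySem.Str.pyGet? s 0 = some '#' then
            match PySem.List.remove? lk s with
            | none => lk
            | some acc' => acc'
          else lk) L = lk
    rw [hstep]
    exact ih

-- for a nonempty line, A's first-char guard and B's one-char-slice guard agree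
theorem pvGuard_eq (line : String) (c : Char) (cs : List Char)
    (h : line.toList = c :: cs) :
    (PySem.Str.slice line (some 0) (some 1) = "#") ↔ c = '#' := by
  rw [← String.toList_inj]
  simp [h, PySem.List.slice]

theorem pvMain (data : List String) (hne : "" ∉ data)
    (ev ie lk : List String)
    (hlk : ∀ s ∈ lk, PySem.Str.pyGet? s 0 ≠ some '#') :
    data.foldl pvStepA (ev, ie, lk) =
      (ev ++ data.filter (fun l => pvKeptB l && !PySem.Str.isIn "role" l && pvIsEventB l),
       ie ++ data.filter (fun l => pvKeptB l && PySem.Str.isIn "role" l),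
       lk ++ data.filter (fun l => pvKeptB l && !PySem.Str.isIn "role" l && !pvIsEventB l &&
         (PySem.Str.isIn "-" l && PySem.Str.isIn ">" l))) := by
  induction data generalizing ev ie lk with
  | nil => simp
  | cons line rest ih =>
    have hline : line ≠ "" := fun h => hne (h ▸ List.mem_cons_self ..)
    have hrest : "" ∉ rest := fun h => hne (List.mem_cons_of_mem _ h)
    obtain ⟨c, cs, hcs⟩ : ∃ c cs, line.toList = c :: cs := by
      cases hl : line.toList with
      | nil => exact absurd (String.toList_inj.mp (by simp [hl])) hline
      | cons c cs => exact ⟨c, cs, rfl⟩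
    have hget : PySem.Str.pyGet? line 0 = some c := by simp [hcs]
    rw [List.foldl_cons]
    by_cases hg : c ≠ '#' ∧ PySem.Str.slice line (some 0) (some 8) ≠ "pk[role="
    · have hkb : pvKeptB line = true := by
        unfold pvKeptB
        have h1 : ¬ (PySem.Str.slice line (some 0) (some 1) = "#") :=
          fun h' => hg.1 ((pvGuard_eq line c cs hcs).mp h')
        simp [h1, hg.2]
      by_cases hrole : PySem.Str.isIn "role" line
      · have hstep : pvStepA (ev, ie, lk) line = (ev, ie ++ [line], pvInnerA lk) := by
          simp only [pvStepA, hget]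
          rw [if_pos hg, if_pos hrole]
        rw [hstep, pvInnerA_id lk hlk, ih hrest _ _ _ hlk]
        have hrole' : PySem.Str.isIn "role" line = true := hrole
        simp at hrole'
        simp [hkb, hrole']
      · have hrole' : PySem.Str.isIn "role" line = false := by
          simpa using hrole
        simp at hrole'
        by_cases hev : (PySem.Str.isIn "src=" line || PySem.Str.isIn "?" line ||
            PySem.Str.isIn "!" line) = true
        · have hstep : pvStepA (ev, ie, lk) line = (ev ++ [line], ie, pvInnerA lk) := by
            simp only [pvStepA, hget]
            rw [if_pos hg, if_neg hrole, if_pos hev]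
          rw [hstep, pvInnerA_id lk hlk, ih hrest _ _ _ hlk]
          have hev' : pvIsEventB line = true := hev
          simp [hkb, hrole', hev']
        · have hev' : pvIsEventB line = false := by
            unfold pvIsEventB; simpa using hev
          by_cases hlink : (PySem.Str.isIn "-" line && PySem.Str.isIn ">" line) = true
          · have hlk' : ∀ s ∈ lk ++ [line], PySem.Str.pyGet? s 0 ≠ some '#' := by
              intro s hs
              rcases List.mem_append.mp hs with h | h
              · exact hlk s h
              · simp at h
                subst h
                rw [hget]
                simp [hg.1]
            have hstep : pvStepA (ev, ie, lk) line =
                (ev, ie, pvInnerA (lk ++ [line])) := by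
              simp only [pvStepA, hget]
              rw [if_pos hg, if_neg hrole, if_neg hev, if_pos hlink]
            rw [hstep, pvInnerA_id _ hlk', ih hrest _ _ _ hlk']
            have hlinkC := hlink
            simp at hlinkC
            simp [hkb, hrole', hev', hlinkC]
          · have hlink' : (PySem.Str.isIn "-" line && PySem.Str.isIn ">" line) = false := by
              simpa using hlink
            have hstep : pvStepA (ev, ie, lk) line = (ev, ie, pvInnerA lk) := by
              simp only [pvStepA, hget]
              rw [if_pos hg, if_neg hrole, if_neg hev, if_neg hlink]
            rw [hstep, pvInnerA_id lk hlk, ih hrest _ _ _ hlk]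
            have hlinkC := hlink'
            simp at hlinkC
            simp [List.filter_cons, hkb, hrole', hev']
            exact hlinkC
    · have hkb : pvKeptB line = false := by
        unfold pvKeptB
        rcases not_and_or.mp hg with h | h
        · have : PySem.Str.slice line (some 0) (some 1) = "#" :=
            (pvGuard_eq line c cs hcs).mpr (not_not.mp h)
          simp [this]
        · simp [not_not.mp h]
      have hstep : pvStepA (ev, ie, lk) line = (ev, ie, pvInnerA lk) := by
        simp only [pvStepA, hget]
        rw [if_neg hg]
      rw [hstep, pvInnerA_id lk hlk, ih hrest _ _ _ hlk]
      simp [hkb]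

-- ===== VERDICT (by name: the statement is the Claim_ definition above) =====
theorem extractRoleChunks_spec : Claim_equal_extractRoleChunks := by
  intro data _ hpre
  unfold Spec_extractRoleChunks extractRoleChunks extractRoleChunks_alt
  rw [pvMain data hpre [] [] [] (by simp)]
  simp
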